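-- pv_equiv track=rewrite | github.com/dattali18/AI_Algorithm | Lab_2/hill_climbing.py | improve
-- ===== SOURCE A (Python) =====
-- def threats(board):
--     # returns number of threats in board
--     count = 0
--     for i in range(0, len(board) - 1):
--         for j in range(i + 1, len(board)):
--             if board[i] == board[j] or abs(i - j) == abs(board[i] - board[j]):
--                 count = count + 1
--     return count
--
-- def improve(board):
--     # improves board if improvement is possible,
--     # returns num of threats in the board
--     minimum = threats(board)
--     improved = [0, board[0]]  # improved holds the best move
--     for r in range(len(board)):
--         tmp = board[r]
--         for c in range(len(board)):
--             board[r] = c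
--             x = threats(board)
--             if x < minimum:
--                 minimum = x
--                 improved = [r, c]
--         board[r] = tmp
--     board[improved[0]] = improved[1]
--     return minimum
-- ===== SOURCE B (Python) =====
-- def improve(board):
--     # Delta-based hill-climbing step: compute total threats once, then the
--     # threat count of each single-queen move as total - old_row_conflicts + new_row_conflicts.
--     # Mutates board exactly like A does (applies the best move found).
--     n = len(board)
--
--     def conflict(i, vi, j, vj):
--         return vi == vj or abs(i - j) == abs(vi - vj)
--
--     total = 0
--     for j in range(n):
--         for i in range(j):
--             if conflict(i, board[i], j, board[j]):
--                 total += 1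
--
--     minimum = total
--     best_r, best_c = 0, board[0]
--     for r in range(n):
--         old = sum(1 for j in range(n) if j != r and conflict(r, board[r], j, board[j]))
--         for c in range(n):
--             new = sum(1 for j in range(n) if j != r and conflict(r, c, j, board[j]))
--             x = total - old + new
--             if x < minimum:
--                 minimum = x
--                 best_r, best_c = r, c
--     board[best_r] = best_c
--     return minimum
-- ===== Notes on version B (the rewrite author's own statement) =====
-- stated objective: faster
-- what changed: B computes the total threat count once and evaluates each candidate move by a conflict delta for the moved row (total - old row conflicts + new row conflicts) instead of recomputing all pairwise threats for every (row, column) move.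
import Mathlib
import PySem

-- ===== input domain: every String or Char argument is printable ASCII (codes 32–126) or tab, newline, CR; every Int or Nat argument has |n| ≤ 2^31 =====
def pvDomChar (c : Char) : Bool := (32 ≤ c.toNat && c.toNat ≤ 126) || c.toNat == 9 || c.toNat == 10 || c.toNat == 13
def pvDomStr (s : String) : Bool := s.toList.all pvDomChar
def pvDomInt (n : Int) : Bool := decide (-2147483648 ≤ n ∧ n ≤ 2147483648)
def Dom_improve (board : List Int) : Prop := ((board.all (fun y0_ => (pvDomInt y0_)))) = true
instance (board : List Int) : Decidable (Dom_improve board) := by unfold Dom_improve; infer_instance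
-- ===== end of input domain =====

-- B is a faster re-implementation (per-move conflict delta instead of a full threat
-- recount per move); the equivalence is about the RETURN value — both Pythons also
-- perform the same in-place mutation of `board` (they apply the same best move).

-- ===== PORT A =====
-- threats(board): nested loops i, then j in range(i+1, n), counting conflicting pairs
def threatsA (board : List Int) : Int :=
  (PySem.List.pyRange 0 ((board.length : Int) - 1)).foldl (fun count i =>
    (PySem.List.pyRange (i + 1) (board.length : Int)).foldl (fun count j =>
      let bi := PySem.List.pyGetD board i 0
      let bj := PySem.List.pyGetD board j 0
      if bi = bj ∨ (i - j).natAbs = (bi - bj).natAbs then count + 1 else count) count) 0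

-- one step of the inner `for c` loop: board[r] = c; x = threats(board); update minimum/improved
def stepAc (r : Int) (st : List Int × Int × Int × Int) (c : Int) : List Int × Int × Int × Int :=
  let b' := st.1.set r.toNat c            -- board[r] = c (r is always in range here)
  let x := threatsA b'
  if x < st.2.1 then (b', x, r, c) else (b', st.2.1, st.2.2.1, st.2.2.2)

-- one step of the outer `for r` loop: tmp = board[r]; inner loop; board[r] = tmp
def stepAr (n : Int) (st : List Int × Int × Int × Int) (r : Int) : List Int × Int × Int × Int :=
  let tmp := PySem.List.pyGetD st.1 r 0
  let st2 := (PySem.List.pyRange 0 n).foldl (stepAc r) st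
  (st2.1.set r.toNat tmp, st2.2)

-- improve(board): the board is carried through the folds because Python mutates it in place
def improve (board : List Int) : Int :=
  let n : Int := (board.length : Int)
  let st := (PySem.List.pyRange 0 n).foldl (stepAr n)
      (board, threatsA board, 0, PySem.List.pyGetD board 0 0)
  st.2.1   -- (Python's final write-back of the best move does not affect the return value)

-- ===== PORT B =====
def conflictB (i vi j vj : Int) : Bool := vi == vj || (i - j).natAbs == (vi - vj).natAbs

-- total threats in one pass over ordered pairs (j outer, i < j inner)
def totalB (board : List Int) : Int :=
  (PySem.List.pyRange 0 (board.length : Int)).foldl (fun total j =>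
    (PySem.List.pyRange 0 j).foldl (fun total i =>
      if conflictB i (PySem.List.pyGetD board i 0) j (PySem.List.pyGetD board j 0)
      then total + 1 else total) total) 0

-- sum(1 for j in range(n) if j != r and conflict(r, v, j, board[j]))
def rowConfB (board : List Int) (r v : Int) : Int :=
  (PySem.List.pyRange 0 (board.length : Int)).foldl (fun acc j =>
    if j ≠ r ∧ conflictB r v j (PySem.List.pyGetD board j 0) then acc + 1 else acc) 0

-- inner `for c` loop step: x = total - old + new; update (minimum, best_r, best_c)
def stepBc (total old r : Int) (board : List Int) (st : Int × Int × Int) (c : Int) : Int × Int × Int :=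
  let x := total - old + rowConfB board r c
  if x < st.1 then (x, r, c) else st

-- outer `for r` loop step
def stepBr (total : Int) (board : List Int) (st : Int × Int × Int) (r : Int) : Int × Int × Int :=
  let old := rowConfB board r (PySem.List.pyGetD board r 0)
  (PySem.List.pyRange 0 (board.length : Int)).foldl (stepBc total old r board) st

def improve_alt (board : List Int) : Int :=
  let total := totalB board
  ((PySem.List.pyRange 0 (board.length : Int)).foldl (stepBr total board)
      (total, 0, PySem.List.pyGetD board 0 0)).1

-- ===== PRECONDITION & SPEC =====
-- Python A reads the first board entry before its loops, so it raises IndexError on the empty board.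
def Pre_improve (board : List Int) : Prop := board ≠ []
instance (board : List Int) : Decidable (Pre_improve board) := by unfold Pre_improve; infer_instance
def pvWitness_improve : List Int := [1, 3, 0, 2]

def Spec_improve (board : List Int) (out : Int) : Prop := out = improve_alt board
instance (board : List Int) (out : Int) : Decidable (Spec_improve board out) := by unfold Spec_improve; infer_instance

-- ===== CLAIM (what is proved, stated in full; the proofs are below) =====
def Claim_equal_improve : Prop := ∀ (board : List Int), Dom_improve board → Pre_improve board → Spec_improve board (improve board)

-- ===== LEMMAS AND PROOFS =====

-- 0/1 weight of the conflict between square (r, v) and square (j, board[j])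
def gval (r : Nat) (v : Int) (b : List Int) (j : Nat) : Int :=
  if conflictB (r : Int) v (j : Int) (b.getD j 0) then 1 else 0

-- total threats, as a double Finset sum over ordered index pairs i < j
def Fv (b : List Int) : Int :=
  ∑ i ∈ Finset.range b.length, ∑ j ∈ Finset.range b.length,
    if i < j then gval i (b.getD i 0) b j else 0

-- conflicts of a hypothetical queen (r, v) against all other rows of b
def Rv (b : List Int) (r : Nat) (v : Int) : Int :=
  ∑ j ∈ Finset.range b.length, if j ≠ r then gval r v b j else 0

theorem pyRange_one_eq (a b : Int) :
    PySem.List.pyRange a b = (List.range (b - a).toNat).map (fun (k : Nat) => a + (k : Int)) := by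
  have H : ∀ (m : Nat) (a b : Int), (b - a).toNat = m →
      PySem.List.pyRange a b = (List.range m).map (fun (k : Nat) => a + (k : Int)) := by
    intro m
    induction m with
    | zero =>
      intro a b hm
      have hab : ¬ a < b := by omega
      rw [PySem.List.pyRange_of_pos a b one_pos]
      simp [hab]
    | succ m ih =>
      intro a b hm
      have hab : a < b := by omega
      rw [PySem.List.pyRange_one_cons hab, ih (a + 1) b (by omega), List.range_succ_eq_map]
      simp only [List.map_cons, List.map_map, Nat.cast_zero, add_zero]
      congr 1
      apply List.map_congr_left
      intro k _
      simp only [Function.comp_apply]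
      push_cast
      ring
  exact H _ a b rfl

theorem conflictB_symm (i vi j vj : Int) : conflictB i vi j vj = conflictB j vj i vi := by
  have h1 : (i - j).natAbs = (j - i).natAbs := by omega
  have h2 : (vi - vj).natAbs = (vj - vi).natAbs := by omega
  have h3 : (vi == vj) = (vj == vi) := by
    by_cases h : vi = vj
    · simp [h]
    · simp [h, Ne.symm h]
  simp [conflictB, h1, h2, h3]

theorem foldl_count_range (p : Nat → Prop) [DecidablePred p] (m : Nat) (a : Int) :
    List.foldl (fun acc k => if p k then acc + 1 else acc) a (List.range m)
      = a + ∑ k ∈ Finset.range m, (if p k then (1:Int) else 0) := by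
  induction m generalizing a with
  | zero => simp
  | succ m ih => rw [List.range_succ, List.foldl_append, Finset.sum_range_succ, ih]; simp; split <;> ring

theorem foldl_add_range (f : Nat → Int) (m : Nat) (a : Int) :
    List.foldl (fun acc k => acc + f k) a (List.range m) = a + ∑ k ∈ Finset.range m, f k := by
  rw [PySem.List.foldl_add]; rfl

theorem gval_symm (b : List Int) (i j : Nat) :
    gval i (b.getD i 0) b j = gval j (b.getD j 0) b i := by
  simp only [gval]
  rw [conflictB_symm]

theorem sum_tri (n : Nat) (f : Nat → Nat → Int) :
    ∑ i ∈ Finset.range (n - 1), ∑ k ∈ Finset.range (n - (i + 1)), f i (i + 1 + k)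
      = ∑ i ∈ Finset.range n, ∑ j ∈ Finset.range n, if i < j then f i j else 0 := by
  have inner : ∀ i, ∑ j ∈ Finset.range n, (if i < j then f i j else 0)
      = ∑ k ∈ Finset.range (n - (i + 1)), f i (i + 1 + k) := by
    intro i
    rw [← Finset.sum_filter]
    have : (Finset.range n).filter (fun j => i < j) = Finset.Ico (i + 1) n := by
      ext k; simp; omega
    rw [this, Finset.sum_Ico_eq_sum_range]
  rw [Finset.sum_congr rfl (fun i _ => inner i)]
  cases n with
  | zero => simp
  | succ m =>
    rw [Finset.sum_range_succ]
    simp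

theorem sum_tri' (n : Nat) (f : Nat → Nat → Int) :
    ∑ j ∈ Finset.range n, ∑ i ∈ Finset.range j, f i j
      = ∑ i ∈ Finset.range n, ∑ j ∈ Finset.range n, if i < j then f i j else 0 := by
  rw [Finset.sum_comm]
  refine Finset.sum_congr rfl (fun j hj => ?_)
  rw [← Finset.sum_filter]
  have : (Finset.range n).filter (fun i => i < j) = Finset.range j := by
    ext k
    simp only [Finset.mem_filter, Finset.mem_range]
    have := Finset.mem_range.1 hj
    omega
  rw [this]

theorem threatsA_eq (b : List Int) : threatsA b = Fv b := by
  unfold threatsA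
  simp only [pyRange_one_eq, List.foldl_map, foldl_count_range, foldl_add_range, zero_add]
  unfold Fv
  rw [← sum_tri]
  have h1 : ((b.length : Int) - 1 - 0).toNat = b.length - 1 := by omega
  rw [h1]
  refine Finset.sum_congr rfl (fun i hi => ?_)
  have h2 : ((b.length : Int) - ((i : Int) + 1)).toNat = b.length - (i + 1) := by omega
  rw [h2]
  refine Finset.sum_congr rfl (fun k hk => ?_)
  have e2 : (i : Int) + 1 + (k : Int) = ((i + 1 + k : Nat) : Int) := by push_cast; ring
  rw [e2, PySem.List.pyGetD_natCast, PySem.List.pyGetD_natCast]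
  unfold gval conflictB
  simp

theorem totalB_eq (b : List Int) : totalB b = Fv b := by
  unfold totalB
  simp only [PySem.List.pyRange_zero_natCast, List.foldl_map, foldl_count_range,
    foldl_add_range, zero_add, PySem.List.pyGetD_natCast]
  unfold Fv
  rw [← sum_tri']
  rfl

theorem rowConfB_eq (b : List Int) (r : Nat) (v : Int) : rowConfB b (r : Int) v = Rv b r v := by
  unfold rowConfB
  simp only [PySem.List.pyRange_zero_natCast, List.foldl_map, foldl_count_range,
    zero_add, PySem.List.pyGetD_natCast]
  unfold Rv gval
  refine Finset.sum_congr rfl (fun j hj => ?_)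
  rw [ite_and]
  by_cases h : (j : Int) = (r : Int)
  · have : j = r := by exact_mod_cast h
    simp [this]
  · have : j ≠ r := by intro hh; exact h (by exact_mod_cast hh)
    simp [this]

theorem F_decomp (b : List Int) (r : Nat) (hr : r < b.length) :
    Fv b = Rv b r (b.getD r 0)
      + ∑ i ∈ (Finset.range b.length).erase r, ∑ j ∈ (Finset.range b.length).erase r,
          (if i < j then gval i (b.getD i 0) b j else 0) := by
  have hmem : r ∈ Finset.range b.length := Finset.mem_range.2 hr
  have hRv : Rv b r (b.getD r 0) = ∑ j ∈ (Finset.range b.length).erase r, gval r (b.getD r 0) b j := by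
    unfold Rv
    rw [← Finset.filter_ne' (Finset.range b.length) r, Finset.sum_filter]
  unfold Fv
  rw [← Finset.add_sum_erase _ _ hmem]
  rw [← Finset.add_sum_erase _ (fun j => if r < j then gval r (b.getD r 0) b j else 0) hmem]
  have hsplit : ∑ i ∈ (Finset.range b.length).erase r, ∑ j ∈ Finset.range b.length,
        (if i < j then gval i (b.getD i 0) b j else 0)
      = ∑ i ∈ (Finset.range b.length).erase r, ((if i < r then gval i (b.getD i 0) b r else 0)
          + ∑ j ∈ (Finset.range b.length).erase r, (if i < j then gval i (b.getD i 0) b j else 0)) :=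
    Finset.sum_congr rfl (fun i _ => (Finset.add_sum_erase _ _ hmem).symm)
  rw [hsplit, Finset.sum_add_distrib]
  have hcomb : ∑ j ∈ (Finset.range b.length).erase r, (if r < j then gval r (b.getD r 0) b j else 0)
      + ∑ i ∈ (Finset.range b.length).erase r, (if i < r then gval i (b.getD i 0) b r else 0)
      = Rv b r (b.getD r 0) := by
    rw [hRv, ← Finset.sum_add_distrib]
    refine Finset.sum_congr rfl (fun j hj => ?_)
    have hjr : j ≠ r := (Finset.mem_erase.1 hj).1
    rcases lt_or_gt_of_ne hjr with hlt | hgt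
    · rw [if_neg (by omega), if_pos (by omega), gval_symm]; ring
    · rw [if_pos (by omega), if_neg (by omega)]; ring
  rw [if_neg (lt_irrefl r), zero_add]
  linarith [hcomb]

theorem F_set (b : List Int) (r : Nat) (c : Int) (hr : r < b.length) :
    Fv (b.set r c) = Fv b - Rv b r (b.getD r 0) + Rv b r c := by
  have hlen : (b.set r c).length = b.length := List.length_set
  have hr' : r < (b.set r c).length := by omega
  have hgd_ne : ∀ j, j ≠ r → (b.set r c).getD j 0 = b.getD j 0 := by
    intro j hj
    simp [List.getD, List.getElem?_set_ne (fun hh : r = j => hj hh.symm)]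
  have hgd_r : (b.set r c).getD r 0 = c := by
    simp [List.getD, hr]
  rw [F_decomp (b.set r c) r hr', F_decomp b r hr, hlen, hgd_r]
  have hR : Rv (b.set r c) r c = Rv b r c := by
    unfold Rv
    rw [hlen]
    refine Finset.sum_congr rfl (fun j hj => ?_)
    by_cases h : j = r
    · simp [h]
    · rw [if_pos h, if_pos h]
      unfold gval
      rw [hgd_ne j h]
  have hcore : ∑ i ∈ (Finset.range b.length).erase r, ∑ j ∈ (Finset.range b.length).erase r,
        (if i < j then gval i ((b.set r c).getD i 0) (b.set r c) j else 0)
      = ∑ i ∈ (Finset.range b.length).erase r, ∑ j ∈ (Finset.range b.length).erase r,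
        (if i < j then gval i (b.getD i 0) b j else 0) := by
    refine Finset.sum_congr rfl (fun i hi => Finset.sum_congr rfl (fun j hj => ?_))
    have hir : i ≠ r := (Finset.mem_erase.1 hi).1
    have hjr : j ≠ r := (Finset.mem_erase.1 hj).1
    unfold gval
    rw [hgd_ne i hir, hgd_ne j hjr]
  rw [hR, hcore]
  ring

theorem inner_lockstep (board : List Int) (rn : Nat) (total old : Int)
    (hx : ∀ c, threatsA (board.set rn c) = total - old + rowConfB board (rn : Int) c)
    (C : List Int) (bcur : List Int) (s : Int × Int × Int)
    (hb : ∀ z, bcur.set rn z = board.set rn z) :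
    (C.foldl (stepAc (rn : Int)) (bcur, s)).2 = C.foldl (stepBc total old (rn : Int) board) s
    ∧ ∀ z, (C.foldl (stepAc (rn : Int)) (bcur, s)).1.set rn z = board.set rn z := by
  induction C generalizing bcur s with
  | nil => exact ⟨rfl, hb⟩
  | cons c C ih =>
    simp only [List.foldl_cons]
    have hstep : stepAc (rn : Int) (bcur, s) c
        = (board.set rn c, stepBc total old (rn : Int) board s c) := by
      unfold stepAc stepBc
      simp only [Int.toNat_natCast]
      rw [hb c, hx c]
      split <;> rfl
    rw [hstep]
    exact ih (board.set rn c) (stepBc total old (rn : Int) board s c)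
      (fun z => by rw [List.set_set])

theorem outer_lockstep (board : List Int) (L : List Int)
    (h : ∀ r ∈ L, ∃ rn : Nat, r = (rn : Int) ∧ rn < board.length) (s : Int × Int × Int) :
    L.foldl (stepAr (board.length : Int)) (board, s) = (board, L.foldl (stepBr (totalB board) board) s) := by
  induction L generalizing s with
  | nil => rfl
  | cons r L ih =>
    obtain ⟨rn, rfl, hrn⟩ := h r (List.mem_cons_self)
    simp only [List.foldl_cons]
    have hx : ∀ c, threatsA (board.set rn c)
        = totalB board - rowConfB board (rn : Int) (PySem.List.pyGetD board (rn : Int) 0)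
          + rowConfB board (rn : Int) c := by
      intro c
      rw [threatsA_eq, F_set board rn c hrn, totalB_eq, rowConfB_eq, rowConfB_eq,
        PySem.List.pyGetD_natCast]
    obtain ⟨h1, h2⟩ := inner_lockstep board rn (totalB board)
      (rowConfB board (rn : Int) (PySem.List.pyGetD board (rn : Int) 0)) hx
      (PySem.List.pyRange 0 (board.length : Int)) board s (fun z => rfl)
    have hstep : stepAr (board.length : Int) (board, s) (rn : Int)
        = (board, stepBr (totalB board) board s (rn : Int)) := by
      unfold stepAr stepBr
      refine Prod.ext ?_ ?_
      · show (_ : List Int × Int × Int × Int).1.set ((rn : Int)).toNat _ = board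
        rw [Int.toNat_natCast, h2, PySem.List.pyGetD_natCast,
          List.getD_eq_getElem board 0 hrn, List.set_getElem_self hrn]
      · exact h1
    rw [hstep]
    exact ih (fun r hr => h r (List.mem_cons_of_mem _ hr)) (stepBr (totalB board) board s (rn : Int))

theorem improve_eq (board : List Int) : improve board = improve_alt board := by
  unfold improve improve_alt
  have hL : ∀ r ∈ PySem.List.pyRange 0 (board.length : Int),
      ∃ rn : Nat, r = (rn : Int) ∧ rn < board.length := by
    intro r hr
    rw [PySem.List.mem_pyRange_one] at hr
    exact ⟨r.toNat, by omega, by omega⟩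
  rw [threatsA_eq, ← totalB_eq]
  show (List.foldl (stepAr (board.length : Int))
      (board, totalB board, 0, PySem.List.pyGetD board 0 0)
      (PySem.List.pyRange 0 (board.length : Int))).2.1
    = (List.foldl (stepBr (totalB board) board)
      (totalB board, 0, PySem.List.pyGetD board 0 0)
      (PySem.List.pyRange 0 (board.length : Int))).1
  rw [outer_lockstep board _ hL _]

-- ===== VERDICT (by name: the statement is the Claim_ definition above) =====
theorem improve_spec : Claim_equal_improve := by
  intro board _ _
  unfold Spec_improve
  exact improve_eq board
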